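-- pv_equiv track=rewrite | github.com/Czar272/ADA_Parcial_2 | P2.py | cruz_mas_grande
-- ===== SOURCE A (Python) =====
-- def cruz_mas_grande(matriz):
--     filas = len(matriz)
--     columnas = len(matriz[0])
--
--     # Creamos las matrices auxiliares para contar 1s en cada dirección
--     arriba = [[0] * columnas for _ in range(filas)]
--     abajo = [[0] * columnas for _ in range(filas)]
--     izquierda = [[0] * columnas for _ in range(filas)]
--     derecha = [[0] * columnas for _ in range(filas)]
--
--     # Llenamos arriba e izquierda
--     for i in range(filas):
--         for j in range(columnas):
--             if matriz[i][j] == 1: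
--                 arriba[i][j] = arriba[i - 1][j] + 1 if i > 0 else 1
--                 izquierda[i][j] = izquierda[i][j - 1] + 1 if j > 0 else 1
--
--     # Llenamos abajo y derecha
--     for i in reversed(range(filas)):
--         for j in reversed(range(columnas)):
--             if matriz[i][j] == 1:
--                 abajo[i][j] = abajo[i + 1][j] + 1 if i < filas - 1 else 1
--                 derecha[i][j] = derecha[i][j + 1] + 1 if j < columnas - 1 else 1
--
--     brazo_maximo = 0
--
--     # Revisamos cada celda para ver cuál tiene la cruz más grande
--     for i in range(filas):
--         for j in range(columnas):
--             brazo = min(arriba[i][j], abajo[i][j], izquierda[i][j], derecha[i][j])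
--             brazo_maximo = max(brazo_maximo, brazo)
--
--     # El tamaño total de la cruz es 4 veces el brazo (menos 1 centro)
--     return (4 * (brazo_maximo - 1) + 1) if brazo_maximo > 0 else 0
-- ===== SOURCE B (Python) =====
-- def cruz_mas_grande(matriz):
--     filas = len(matriz)
--     columnas = len(matriz[0])
--
--     brazo_maximo = 0
--     for i in range(filas):
--         for j in range(columnas):
--             if matriz[i][j] != 1:
--                 continue
--             # expand outward in each direction, counting the center itself
--             up = 1
--             while up <= i and matriz[i - up][j] == 1:
--                 up += 1
--             down = 1
--             while i + down < filas and matriz[i + down][j] == 1: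
--                 down += 1
--             left = 1
--             while left <= j and matriz[i][j - left] == 1:
--                 left += 1
--             right = 1
--             while j + right < columnas and matriz[i][j + right] == 1:
--                 right += 1
--             brazo_maximo = max(brazo_maximo, min(up, down, left, right))
--
--     return (4 * (brazo_maximo - 1) + 1) if brazo_maximo > 0 else 0
-- ===== Notes on version B (the rewrite author's own statement) =====
-- stated objective: faster
-- what changed: Drops the four auxiliary prefix matrices and their three full passes; B scans once and, only at each 1-cell, walks outward in the four directions counting consecutive 1s (center included), keeping a running maximum arm, with the same final formula.
import Mathlib
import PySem

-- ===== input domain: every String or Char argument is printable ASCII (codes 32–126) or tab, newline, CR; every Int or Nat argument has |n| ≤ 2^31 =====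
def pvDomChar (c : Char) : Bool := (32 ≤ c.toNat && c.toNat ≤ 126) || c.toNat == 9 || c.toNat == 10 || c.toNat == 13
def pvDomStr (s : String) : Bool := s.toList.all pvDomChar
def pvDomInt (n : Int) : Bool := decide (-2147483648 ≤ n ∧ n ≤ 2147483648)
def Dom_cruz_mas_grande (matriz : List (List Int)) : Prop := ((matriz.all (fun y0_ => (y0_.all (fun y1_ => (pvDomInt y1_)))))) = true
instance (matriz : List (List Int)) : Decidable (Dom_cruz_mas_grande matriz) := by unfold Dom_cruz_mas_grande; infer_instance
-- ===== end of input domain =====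

-- B replaces A's four auxiliary prefix matrices (three fill passes) by a direct outward walk
-- from every 1-cell counting the four consecutive-1 arms; no allocation, measured faster on the
-- generated inputs; same results.

-- matriz[i][j] with in-range nonnegative indices (Pre_ guarantees in-range); default is never hit inside Pre_
def pvCell (mat : List (List Int)) (i j : Nat) : Int := (mat.getD i []).getD j 0

-- ===== PORT A =====
-- the j-loop of the first fill pass: writes row i of `arriba` and of `izquierda` left-to-right
def pvFillUpLeftRow (mat : List (List Int)) (prevUp : List Int) (i columnas : Nat) :
    List Int × List Int :=
  (List.range columnas).foldl
    (fun st j =>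
      if pvCell mat i j = 1 then
        (st.1 ++ [if 0 < i then prevUp.getD j 0 + 1 else 1],
         st.2 ++ [if 0 < j then st.2.getD (j - 1) 0 + 1 else 1])
      else (st.1 ++ [(0 : Int)], st.2 ++ [(0 : Int)]))
    ([], [])

-- the i-loop of the first fill pass (`arriba`, `izquierda`)
def pvFillUpLeft (mat : List (List Int)) (filas columnas : Nat) :
    List (List Int) × List (List Int) :=
  (List.range filas).foldl
    (fun st i =>
      let r := pvFillUpLeftRow mat (st.1.getD (i - 1) []) i columnas
      (st.1 ++ [r.1], st.2 ++ [r.2]))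
    ([], [])

-- the reversed j-loop of the second fill pass: row i of `abajo` and `derecha`, right-to-left
def pvFillDownRightRow (mat : List (List Int)) (prevDown : List Int) (i filas columnas : Nat) :
    List Int × List Int :=
  ((List.range columnas).reverse).foldl
    (fun st j =>
      if pvCell mat i j = 1 then
        ((if i < filas - 1 then prevDown.getD j 0 + 1 else 1) :: st.1,
         (if j < columnas - 1 then st.2.headD 0 + 1 else 1) :: st.2)
      else ((0 : Int) :: st.1, (0 : Int) :: st.2))
    ([], [])

-- the reversed i-loop of the second fill pass (`abajo`, `derecha`)
def pvFillDownRight (mat : List (List Int)) (filas columnas : Nat) :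
    List (List Int) × List (List Int) :=
  ((List.range filas).reverse).foldl
    (fun st i =>
      let r := pvFillDownRightRow mat (st.1.headD []) i filas columnas
      (r.1 :: st.1, r.2 :: st.2))
    ([], [])

def cruz_mas_grande (matriz : List (List Int)) : Int :=
  let filas := matriz.length
  let columnas := (matriz.headD []).length   -- matriz[0]; Pre_ excludes the empty matrix (IndexError)
  let ul := pvFillUpLeft matriz filas columnas
  let dr := pvFillDownRight matriz filas columnas
  let brazo_maximo :=
    (List.range filas).foldl (fun acc i =>
      (List.range columnas).foldl (fun acc j =>
        max acc (min (min (min (pvCell ul.1 i j) (pvCell dr.1 i j))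
          (pvCell ul.2 i j)) (pvCell dr.2 i j))) acc) (0 : Int)
  if 0 < brazo_maximo then 4 * (brazo_maximo - 1) + 1 else 0

-- ===== PORT B =====
-- `while up <= i and matriz[i-up][j] == 1: up += 1`
def pvUpWhile (mat : List (List Int)) (i j up : Nat) : Nat :=
  if h : up ≤ i ∧ pvCell mat (i - up) j = 1 then pvUpWhile mat i j (up + 1) else up
termination_by i + 1 - up
decreasing_by omega

-- `while i + down < filas and matriz[i+down][j] == 1: down += 1`
def pvDownWhile (mat : List (List Int)) (filas i j down : Nat) : Nat :=
  if h : i + down < filas ∧ pvCell mat (i + down) j = 1 then pvDownWhile mat filas i j (down + 1) else down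
termination_by filas - (i + down)
decreasing_by omega

-- `while left <= j and matriz[i][j-left] == 1: left += 1`
def pvLeftWhile (mat : List (List Int)) (i j left : Nat) : Nat :=
  if h : left ≤ j ∧ pvCell mat i (j - left) = 1 then pvLeftWhile mat i j (left + 1) else left
termination_by j + 1 - left
decreasing_by omega

-- `while j + right < columnas and matriz[i][j+right] == 1: right += 1`
def pvRightWhile (mat : List (List Int)) (columnas i j right : Nat) : Nat :=
  if h : j + right < columnas ∧ pvCell mat i (j + right) = 1 then pvRightWhile mat columnas i j (right + 1) else right
termination_by columnas - (j + right)
decreasing_by omega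

def cruz_mas_grande_alt (matriz : List (List Int)) : Int :=
  let filas := matriz.length
  let columnas := (matriz.headD []).length
  let brazo_maximo :=
    (List.range filas).foldl (fun acc i =>
      (List.range columnas).foldl (fun acc j =>
        if pvCell matriz i j = 1 then
          max acc ((min (min (min (pvUpWhile matriz i j 1) (pvDownWhile matriz filas i j 1))
            (pvLeftWhile matriz i j 1)) (pvRightWhile matriz columnas i j 1) : Nat) : Int)
        else acc) acc) (0 : Int)
  if 0 < brazo_maximo then 4 * (brazo_maximo - 1) + 1 else 0

-- ===== PRECONDITION & SPEC =====
-- Pre_ excludes exactly the inputs where the Python A raises IndexError: the empty matrix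
-- (matriz[0]) and matrices with a row shorter than the first row (matriz[i][j], j < len(matriz[0])).
def Pre_cruz_mas_grande (matriz : List (List Int)) : Prop :=
  matriz ≠ [] ∧ ∀ row ∈ matriz, (matriz.headD []).length ≤ row.length
instance (matriz : List (List Int)) : Decidable (Pre_cruz_mas_grande matriz) := by
  unfold Pre_cruz_mas_grande; infer_instance

def pvWitness_cruz_mas_grande : List (List Int) := [[1, 0], [1, 1]]

def Spec_cruz_mas_grande (matriz : List (List Int)) (out : Int) : Prop := out = cruz_mas_grande_alt matriz
instance (matriz : List (List Int)) (out : Int) : Decidable (Spec_cruz_mas_grande matriz out) := by unfold Spec_cruz_mas_grande; infer_instance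

-- ===== CLAIM (what is proved, stated in full; the proofs are below) =====
def Claim_equal_cruz_mas_grande : Prop := ∀ (matriz : List (List Int)), Dom_cruz_mas_grande matriz → Pre_cruz_mas_grande matriz → Spec_cruz_mas_grande matriz (cruz_mas_grande matriz)

-- ===== LEMMAS AND PROOFS =====

-- run of consecutive 1s at (i,j),(i-1,j),… going up, 0 if (i,j) itself is not 1
def pvUpN (mat : List (List Int)) : Nat → Nat → Nat
  | 0, j => if pvCell mat 0 j = 1 then 1 else 0
  | (i+1), j => if pvCell mat (i+1) j = 1 then pvUpN mat i j + 1 else 0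

def pvLeftN (mat : List (List Int)) (i : Nat) : Nat → Nat
  | 0 => if pvCell mat i 0 = 1 then 1 else 0
  | (j+1) => if pvCell mat i (j+1) = 1 then pvLeftN mat i j + 1 else 0

def pvDownN (mat : List (List Int)) (filas i j : Nat) : Nat :=
  if pvCell mat i j = 1 then (if i < filas - 1 then pvDownN mat filas (i + 1) j + 1 else 1) else 0
termination_by filas - i
decreasing_by omega

def pvRightN (mat : List (List Int)) (columnas i j : Nat) : Nat :=
  if pvCell mat i j = 1 then (if j < columnas - 1 then pvRightN mat columnas i (j + 1) + 1 else 1) else 0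
termination_by columnas - j
decreasing_by omega

lemma pvUpN_zero (mat : List (List Int)) (i j : Nat) (h : pvCell mat i j ≠ 1) :
    pvUpN mat i j = 0 := by
  cases i <;> simp [pvUpN, h]

lemma pvLeftN_zero (mat : List (List Int)) (i j : Nat) (h : pvCell mat i j ≠ 1) :
    pvLeftN mat i j = 0 := by
  cases j <;> simp [pvLeftN, h]

lemma pvDownN_zero (mat : List (List Int)) (filas i j : Nat) (h : pvCell mat i j ≠ 1) :
    pvDownN mat filas i j = 0 := by
  rw [pvDownN]; simp [h]

lemma pvRightN_zero (mat : List (List Int)) (columnas i j : Nat) (h : pvCell mat i j ≠ 1) :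
    pvRightN mat columnas i j = 0 := by
  rw [pvRightN]; simp [h]

lemma pv_getD_map_range {α : Type} (f : Nat → α) (n k : Nat) (d : α) (h : k < n) :
    ((List.range n).map f).getD k d = f k := by
  rw [List.getD_eq_getElem?_getD]
  simp [h]

lemma pvFillUpLeftRow_spec (mat : List (List Int)) (prevUp : List Int) (i columnas : Nat) :
    pvFillUpLeftRow mat prevUp i columnas =
      ((List.range columnas).map
         (fun j => if pvCell mat i j = 1 then (if 0 < i then prevUp.getD j 0 + 1 else 1) else 0),
       (List.range columnas).map (fun j => (pvLeftN mat i j : Int))) := by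
  unfold pvFillUpLeftRow
  suffices h : ∀ k,
      (List.range k).foldl
        (fun st j => if pvCell mat i j = 1 then
            (st.1 ++ [if 0 < i then prevUp.getD j 0 + 1 else 1],
             st.2 ++ [if 0 < j then st.2.getD (j - 1) 0 + 1 else 1])
          else (st.1 ++ [(0 : Int)], st.2 ++ [(0 : Int)])) ([], []) =
        ((List.range k).map
           (fun j => if pvCell mat i j = 1 then (if 0 < i then prevUp.getD j 0 + 1 else 1) else 0),
         (List.range k).map (fun j => (pvLeftN mat i j : Int))) from h columnas
  intro k
  induction k with
  | zero => simp
  | succ k ih =>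
    rw [List.range_succ, List.foldl_append, ih, List.foldl_cons, List.foldl_nil]
    simp only [List.map_append, List.map_cons, List.map_nil]
    by_cases hc : pvCell mat i k = 1
    · simp only [hc, if_pos, Prod.mk.injEq, if_true]
      refine ⟨by simp, ?_⟩
      cases k with
      | zero => simp [pvLeftN, hc]
      | succ m =>
        rw [List.append_cancel_left_eq]
        have hg : ((List.range (m + 1)).map (fun j => (pvLeftN mat i j : Int))).getD (m + 1 - 1) 0
            = (pvLeftN mat i m : Int) := by
          simpa using pv_getD_map_range (fun j => (pvLeftN mat i j : Int)) (m + 1) m 0 (Nat.lt_succ_self m)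
        simp only [hg]
        simp [pvLeftN, hc]
    · simp [hc, pvLeftN_zero mat i k hc]

lemma pvFillUpLeft_spec (mat : List (List Int)) (filas columnas : Nat) :
    pvFillUpLeft mat filas columnas =
      ((List.range filas).map (fun i => (List.range columnas).map (fun j => (pvUpN mat i j : Int))),
       (List.range filas).map (fun i => (List.range columnas).map (fun j => (pvLeftN mat i j : Int)))) := by
  unfold pvFillUpLeft
  suffices h : ∀ k,
      (List.range k).foldl
        (fun st i =>
          let r := pvFillUpLeftRow mat (st.1.getD (i - 1) []) i columnas
          (st.1 ++ [r.1], st.2 ++ [r.2])) ([], []) =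
        ((List.range k).map (fun i => (List.range columnas).map (fun j => (pvUpN mat i j : Int))),
         (List.range k).map (fun i => (List.range columnas).map (fun j => (pvLeftN mat i j : Int)))) from
    h filas
  intro k
  induction k with
  | zero => simp
  | succ k ih =>
    rw [List.range_succ, List.foldl_append, ih, List.foldl_cons, List.foldl_nil]
    simp only [pvFillUpLeftRow_spec, List.map_append, List.map_cons, List.map_nil, Prod.mk.injEq]
    refine ⟨?_, by trivial⟩
    rw [List.append_cancel_left_eq]
    refine List.cons_eq_cons.mpr ⟨?_, rfl⟩
    apply List.map_congr_left
    intro j hj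
    have hjc : j < columnas := List.mem_range.mp hj
    by_cases hc : pvCell mat k j = 1
    · cases k with
      | zero => simp [hc, pvUpN]
      | succ m =>
        have hrow : ((List.range (m + 1)).map
              (fun i => (List.range columnas).map (fun j => (pvUpN mat i j : Int)))).getD (m + 1 - 1) []
            = (List.range columnas).map (fun j => (pvUpN mat m j : Int)) := by
          simpa using pv_getD_map_range _ (m + 1) m [] (Nat.lt_succ_self m)
        rw [hrow, pv_getD_map_range _ _ _ _ hjc]
        simp [hc, pvUpN]
    · simp [hc, pvUpN_zero mat k j hc]

-- entries j, j+1, …, columnas-1 of row i of `abajo`, given the row below as prevDown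
def pvDEnts (mat : List (List Int)) (prevDown : List Int) (i filas columnas k : Nat) : List Int :=
  if k < columnas then
    (if pvCell mat i k = 1 then (if i < filas - 1 then prevDown.getD k 0 + 1 else 1) else 0)
      :: pvDEnts mat prevDown i filas columnas (k + 1)
  else []
termination_by columnas - k
decreasing_by omega

-- entries j, …, columnas-1 of row i of `derecha`
def pvREnts (mat : List (List Int)) (columnas i k : Nat) : List Int :=
  if k < columnas then (pvRightN mat columnas i k : Int) :: pvREnts mat columnas i (k + 1) else []
termination_by columnas - k
decreasing_by omega

-- rows k, …, filas-1 of (`abajo`, `derecha`)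
def pvDRRows (mat : List (List Int)) (filas columnas k : Nat) : List (List Int) × List (List Int) :=
  if k < filas then
    let r := pvDRRows mat filas columnas (k + 1)
    (pvDEnts mat (r.1.headD []) k filas columnas 0 :: r.1, pvREnts mat columnas k 0 :: r.2)
  else ([], [])
termination_by filas - k
decreasing_by omega

lemma pvFillDownRightRow_spec (mat : List (List Int)) (prevDown : List Int) (i filas columnas : Nat) :
    pvFillDownRightRow mat prevDown i filas columnas =
      (pvDEnts mat prevDown i filas columnas 0, pvREnts mat columnas i 0) := by
  unfold pvFillDownRightRow
  suffices h : ∀ k, k ≤ columnas →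
      ((List.range k).reverse).foldl
        (fun st j => if pvCell mat i j = 1 then
            ((if i < filas - 1 then prevDown.getD j 0 + 1 else 1) :: st.1,
             (if j < columnas - 1 then st.2.headD 0 + 1 else 1) :: st.2)
          else ((0 : Int) :: st.1, (0 : Int) :: st.2))
        (pvDEnts mat prevDown i filas columnas k, pvREnts mat columnas i k) =
        (pvDEnts mat prevDown i filas columnas 0, pvREnts mat columnas i 0) by
    have h0 := h columnas le_rfl
    have hemp : (pvDEnts mat prevDown i filas columnas columnas, pvREnts mat columnas i columnas)
        = (([] : List Int), ([] : List Int)) := by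
      rw [pvDEnts, pvREnts]; simp
    rw [hemp] at h0
    exact h0
  intro k
  induction k with
  | zero => intro _; simp
  | succ k ih =>
    intro hk
    have hkc : k < columnas := hk
    rw [List.range_succ, List.reverse_append, List.reverse_singleton, List.singleton_append,
      List.foldl_cons]
    have hstep :
        (if pvCell mat i k = 1 then
            ((if i < filas - 1 then prevDown.getD k 0 + 1 else 1) :: (pvDEnts mat prevDown i filas columnas (k + 1)),
             (if k < columnas - 1 then (pvREnts mat columnas i (k + 1)).headD 0 + 1 else 1) :: (pvREnts mat columnas i (k + 1)))
          else ((0 : Int) :: (pvDEnts mat prevDown i filas columnas (k + 1)), (0 : Int) :: (pvREnts mat columnas i (k + 1))))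
        = (pvDEnts mat prevDown i filas columnas k, pvREnts mat columnas i k) := by
      conv_rhs => rw [pvDEnts, pvREnts]
      rw [if_pos hkc, if_pos hkc]
      by_cases hc : pvCell mat i k = 1
      · simp only [hc, if_true, Prod.mk.injEq]
        refine ⟨by trivial, ?_⟩
        refine List.cons_eq_cons.mpr ⟨?_, rfl⟩
        conv_rhs => rw [pvRightN]
        rw [if_pos hc]
        by_cases h2 : k < columnas - 1
        · have h2' : k + 1 < columnas := by omega
          rw [if_pos h2, if_pos h2]
          rw [pvREnts, if_pos h2']
          simp
        · rw [if_neg h2, if_neg h2]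
          simp
      · simp only [hc, if_false, Prod.mk.injEq]
        exact ⟨by trivial, List.cons_eq_cons.mpr ⟨by rw [pvRightN_zero mat columnas i k hc]; simp, rfl⟩⟩
    rw [hstep]
    exact ih (le_of_lt hkc)

lemma pvFillDownRight_spec (mat : List (List Int)) (filas columnas : Nat) :
    pvFillDownRight mat filas columnas = pvDRRows mat filas columnas 0 := by
  unfold pvFillDownRight
  suffices h : ∀ k, k ≤ filas →
      ((List.range k).reverse).foldl
        (fun st i =>
          let r := pvFillDownRightRow mat (st.1.headD []) i filas columnas
          (r.1 :: st.1, r.2 :: st.2))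
        (pvDRRows mat filas columnas k) = pvDRRows mat filas columnas 0 by
    have h0 := h filas le_rfl
    have hemp : pvDRRows mat filas columnas filas = (([] : List (List Int)), ([] : List (List Int))) := by
      rw [pvDRRows]; simp
    rw [hemp] at h0
    exact h0
  intro k
  induction k with
  | zero => intro _; simp
  | succ k ih =>
    intro hk
    have hkc : k < filas := hk
    rw [List.range_succ, List.reverse_append, List.reverse_singleton, List.singleton_append,
      List.foldl_cons]
    have hstep :
        (let r := pvFillDownRightRow mat ((pvDRRows mat filas columnas (k + 1)).1.headD []) k filas columnas
         (r.1 :: (pvDRRows mat filas columnas (k + 1)).1, r.2 :: (pvDRRows mat filas columnas (k + 1)).2))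
        = pvDRRows mat filas columnas k := by
      conv_rhs => rw [pvDRRows]
      rw [if_pos hkc, pvFillDownRightRow_spec]
    rw [hstep]
    exact ih (le_of_lt hkc)

lemma pvDEnts_getD (mat : List (List Int)) (prev : List Int) (i filas columnas : Nat) :
    ∀ t k, k + t < columnas →
      (pvDEnts mat prev i filas columnas k).getD t 0 =
        (if pvCell mat i (k + t) = 1 then (if i < filas - 1 then prev.getD (k + t) 0 + 1 else 1) else 0) := by
  intro t
  induction t with
  | zero =>
    intro k hk
    rw [pvDEnts, if_pos (show k < columnas by omega)]
    simp
  | succ t ih =>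
    intro k hk
    rw [pvDEnts, if_pos (show k < columnas by omega)]
    rw [List.getD_cons_succ]
    rw [ih (k + 1) (by omega)]
    have e1 : k + 1 + t = k + (t + 1) := by omega
    rw [e1]

lemma pvREnts_getD (mat : List (List Int)) (columnas i : Nat) :
    ∀ t k, k + t < columnas →
      (pvREnts mat columnas i k).getD t 0 = (pvRightN mat columnas i (k + t) : Int) := by
  intro t
  induction t with
  | zero =>
    intro k hk
    rw [pvREnts, if_pos (show k < columnas by omega)]
    simp
  | succ t ih =>
    intro k hk
    rw [pvREnts, if_pos (show k < columnas by omega)]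
    rw [List.getD_cons_succ]
    rw [ih (k + 1) (by omega)]
    have e1 : k + 1 + t = k + (t + 1) := by omega
    rw [e1]

lemma pvDRRows_getD1 (mat : List (List Int)) (filas columnas : Nat) :
    ∀ t k, k + t < filas →
      (pvDRRows mat filas columnas k).1.getD t [] =
        pvDEnts mat ((pvDRRows mat filas columnas (k + t + 1)).1.headD []) (k + t) filas columnas 0 := by
  intro t
  induction t with
  | zero =>
    intro k hk
    conv_lhs => rw [pvDRRows]
    rw [if_pos (show k < filas by omega)]
    simp
  | succ t ih =>
    intro k hk
    conv_lhs => rw [pvDRRows]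
    rw [if_pos (show k < filas by omega)]
    simp only [List.getD_cons_succ]
    rw [ih (k + 1) (by omega)]
    have e1 : k + 1 + t = k + (t + 1) := by omega
    rw [e1]

lemma pvDRRows_getD2 (mat : List (List Int)) (filas columnas : Nat) :
    ∀ t k, k + t < filas →
      (pvDRRows mat filas columnas k).2.getD t [] = pvREnts mat columnas (k + t) 0 := by
  intro t
  induction t with
  | zero =>
    intro k hk
    conv_lhs => rw [pvDRRows]
    rw [if_pos (show k < filas by omega)]
    simp
  | succ t ih =>
    intro k hk
    conv_lhs => rw [pvDRRows]
    rw [if_pos (show k < filas by omega)]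
    simp only [List.getD_cons_succ]
    rw [ih (k + 1) (by omega)]
    have e1 : k + 1 + t = k + (t + 1) := by omega
    rw [e1]

lemma pvRow0 (mat : List (List Int)) (filas columnas i : Nat) (hi : i < filas) :
    (pvDRRows mat filas columnas 0).1.getD i [] =
      pvDEnts mat ((pvDRRows mat filas columnas (i + 1)).1.headD []) i filas columnas 0 := by
  have := pvDRRows_getD1 mat filas columnas i 0 (by omega)
  simpa using this

lemma pvCellDown (mat : List (List Int)) (filas columnas : Nat) :
    ∀ n i j, filas - i ≤ n → i < filas → j < columnas →
      pvCell (pvDRRows mat filas columnas 0).1 i j = (pvDownN mat filas i j : Int) := by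
  intro n
  induction n with
  | zero => intro i j h hi hj; omega
  | succ n ih =>
    intro i j h hi hj
    unfold pvCell
    rw [pvRow0 mat filas columnas i hi]
    rw [pvDEnts_getD mat _ i filas columnas j 0 (by omega)]
    simp only [Nat.zero_add]
    by_cases hc : pvCell mat i j = 1
    · rw [if_pos hc]
      by_cases h2 : i < filas - 1
      · rw [if_pos h2]
        have hip : i + 1 < filas := by omega
        have hh : (pvDRRows mat filas columnas (i + 1)).1.headD [] =
            pvDEnts mat ((pvDRRows mat filas columnas (i + 1 + 1)).1.headD []) (i + 1) filas columnas 0 := by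
          conv_lhs => rw [pvDRRows]
          rw [if_pos hip]
          simp
        rw [hh, ← pvRow0 mat filas columnas (i + 1) hip]
        have hcell := ih (i + 1) j (by omega) hip hj
        unfold pvCell at hcell
        rw [hcell]
        conv_rhs => rw [pvDownN]
        simp only [hc, if_true, h2, if_pos]
        push_cast
        ring
      · rw [if_neg h2]
        conv_rhs => rw [pvDownN]
        simp [hc, h2]
    · rw [if_neg hc]
      rw [pvDownN_zero mat filas i j hc]
      simp

lemma pvCellRight (mat : List (List Int)) (filas columnas i j : Nat)
    (hi : i < filas) (hj : j < columnas) :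
    pvCell (pvDRRows mat filas columnas 0).2 i j = (pvRightN mat columnas i j : Int) := by
  unfold pvCell
  have h2 := pvDRRows_getD2 mat filas columnas i 0 (by omega)
  simp only [Nat.zero_add] at h2
  rw [h2]
  have h3 := pvREnts_getD mat columnas i j 0 (by omega)
  simpa using h3

lemma pvUpWhile_spec (mat : List (List Int)) (i j : Nat) :
    ∀ n u, i + 1 - u ≤ n → pvUpWhile mat i j u = u + (if u ≤ i then pvUpN mat (i - u) j else 0) := by
  intro n
  induction n with
  | zero =>
    intro u h
    rw [pvUpWhile]
    have hni : ¬ u ≤ i := by omega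
    simp [hni]
  | succ n ih =>
    intro u h
    rw [pvUpWhile]
    by_cases hc : u ≤ i ∧ pvCell mat (i - u) j = 1
    · rw [dif_pos hc, ih (u + 1) (by omega)]
      rcases hc with ⟨h1, h2⟩
      rcases Nat.eq_zero_or_pos (i - u) with h0 | hp
      · have hni : ¬ (u + 1 ≤ i) := by omega
        rw [h0] at h2
        simp [hni, if_pos h1, h0, pvUpN, h2]
      · obtain ⟨m, hm⟩ : ∃ m, i - u = m + 1 := ⟨i - u - 1, by omega⟩
        have h1' : u + 1 ≤ i := by omega
        have hmm : i - (u + 1) = m := by omega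
        rw [if_pos h1', if_pos h1, hmm, hm]
        rw [hm] at h2
        simp [pvUpN, h2]
        omega
    · rw [dif_neg hc]
      by_cases h1 : u ≤ i
      · have h2 : pvCell mat (i - u) j ≠ 1 := fun hh => hc ⟨h1, hh⟩
        simp [h1, pvUpN_zero mat _ _ h2]
      · simp [h1]

lemma pvLeftWhile_spec (mat : List (List Int)) (i j : Nat) :
    ∀ n u, j + 1 - u ≤ n → pvLeftWhile mat i j u = u + (if u ≤ j then pvLeftN mat i (j - u) else 0) := by
  intro n
  induction n with
  | zero =>
    intro u h
    rw [pvLeftWhile]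
    have hni : ¬ u ≤ j := by omega
    simp [hni]
  | succ n ih =>
    intro u h
    rw [pvLeftWhile]
    by_cases hc : u ≤ j ∧ pvCell mat i (j - u) = 1
    · rw [dif_pos hc, ih (u + 1) (by omega)]
      rcases hc with ⟨h1, h2⟩
      rcases Nat.eq_zero_or_pos (j - u) with h0 | hp
      · have hni : ¬ (u + 1 ≤ j) := by omega
        rw [h0] at h2
        simp [hni, if_pos h1, h0, pvLeftN, h2]
      · obtain ⟨m, hm⟩ : ∃ m, j - u = m + 1 := ⟨j - u - 1, by omega⟩
        have h1' : u + 1 ≤ j := by omega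
        have hmm : j - (u + 1) = m := by omega
        rw [if_pos h1', if_pos h1, hmm, hm]
        rw [hm] at h2
        simp [pvLeftN, h2]
        omega
    · rw [dif_neg hc]
      by_cases h1 : u ≤ j
      · have h2 : pvCell mat i (j - u) ≠ 1 := fun hh => hc ⟨h1, hh⟩
        simp [h1, pvLeftN_zero mat _ _ h2]
      · simp [h1]

lemma pvDownWhile_spec (mat : List (List Int)) (filas i j : Nat) :
    ∀ n d, filas - (i + d) ≤ n →
      pvDownWhile mat filas i j d = d + (if i + d < filas then pvDownN mat filas (i + d) j else 0) := by
  intro n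
  induction n with
  | zero =>
    intro d h
    rw [pvDownWhile]
    have hni : ¬ i + d < filas := by omega
    simp [hni]
  | succ n ih =>
    intro d h
    rw [pvDownWhile]
    by_cases hc : i + d < filas ∧ pvCell mat (i + d) j = 1
    · rw [dif_pos hc, ih (d + 1) (by omega)]
      rcases hc with ⟨h1, h2⟩
      rw [if_pos h1]
      conv_rhs => rw [pvDownN]
      rw [if_pos h2]
      have harith : i + (d + 1) = i + d + 1 := by omega
      rw [harith]
      by_cases h3 : i + d + 1 < filas
      · have h3' : i + d < filas - 1 := by omega
        rw [if_pos h3, if_pos h3']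
        omega
      · have h3' : ¬ (i + d < filas - 1) := by omega
        rw [if_neg h3, if_neg h3']

    · rw [dif_neg hc]
      by_cases h1 : i + d < filas
      · have h2 : pvCell mat (i + d) j ≠ 1 := fun hh => hc ⟨h1, hh⟩
        simp [h1, pvDownN_zero mat _ _ _ h2]
      · simp [h1]

lemma pvRightWhile_spec (mat : List (List Int)) (columnas i j : Nat) :
    ∀ n d, columnas - (j + d) ≤ n →
      pvRightWhile mat columnas i j d = d + (if j + d < columnas then pvRightN mat columnas i (j + d) else 0) := by
  intro n
  induction n with
  | zero =>
    intro d h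
    rw [pvRightWhile]
    have hni : ¬ j + d < columnas := by omega
    simp [hni]
  | succ n ih =>
    intro d h
    rw [pvRightWhile]
    by_cases hc : j + d < columnas ∧ pvCell mat i (j + d) = 1
    · rw [dif_pos hc, ih (d + 1) (by omega)]
      rcases hc with ⟨h1, h2⟩
      rw [if_pos h1]
      conv_rhs => rw [pvRightN]
      rw [if_pos h2]
      have harith : j + (d + 1) = j + d + 1 := by omega
      rw [harith]
      by_cases h3 : j + d + 1 < columnas
      · have h3' : j + d < columnas - 1 := by omega
        rw [if_pos h3, if_pos h3']
        omega
      · have h3' : ¬ (j + d < columnas - 1) := by omega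
        rw [if_neg h3, if_neg h3']

    · rw [dif_neg hc]
      by_cases h1 : j + d < columnas
      · have h2 : pvCell mat i (j + d) ≠ 1 := fun hh => hc ⟨h1, hh⟩
        simp [h1, pvRightN_zero mat _ _ _ h2]
      · simp [h1]

lemma pvFoldl_eq_nonneg {β : Type} (fA fB : Int → β → Int) :
    ∀ (l : List β), (∀ acc x, x ∈ l → 0 ≤ acc → fA acc x = fB acc x ∧ 0 ≤ fB acc x) →
      ∀ acc, 0 ≤ acc → l.foldl fA acc = l.foldl fB acc ∧ 0 ≤ l.foldl fB acc := by
  intro l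
  induction l with
  | nil => intro _ acc h0; exact ⟨rfl, h0⟩
  | cons a t ih =>
    intro h acc h0
    obtain ⟨he, hn⟩ := h acc a (List.mem_cons_self) h0
    rw [List.foldl_cons, List.foldl_cons, he]
    exact ih (fun acc x hx h0 => h acc x (List.mem_cons_of_mem _ hx) h0) _ hn

lemma pvBrazo_eq (mat : List (List Int)) (filas columnas : Nat) :
    (List.range filas).foldl (fun acc i =>
      (List.range columnas).foldl (fun acc j =>
        max acc (min (min (min (pvCell (pvFillUpLeft mat filas columnas).1 i j)
            (pvCell (pvFillDownRight mat filas columnas).1 i j))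
          (pvCell (pvFillUpLeft mat filas columnas).2 i j))
          (pvCell (pvFillDownRight mat filas columnas).2 i j))) acc) (0 : Int) =
    (List.range filas).foldl (fun acc i =>
      (List.range columnas).foldl (fun acc j =>
        if pvCell mat i j = 1 then
          max acc ((min (min (min (pvUpWhile mat i j 1) (pvDownWhile mat filas i j 1))
            (pvLeftWhile mat i j 1)) (pvRightWhile mat columnas i j 1) : Nat) : Int)
        else acc) acc) (0 : Int) := by
  refine (pvFoldl_eq_nonneg _ _ (List.range filas) ?_ 0 le_rfl).1
  intro acc i hi h0
  have hif : i < filas := List.mem_range.mp hi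
  refine pvFoldl_eq_nonneg _ _ (List.range columnas) ?_ acc h0
  intro acc2 j hj h02
  have hjc : j < columnas := List.mem_range.mp hj
  have hU : pvCell (pvFillUpLeft mat filas columnas).1 i j = ((pvUpN mat i j : Nat) : Int) := by
    rw [pvFillUpLeft_spec]
    unfold pvCell
    rw [pv_getD_map_range _ _ _ _ hif, pv_getD_map_range _ _ _ _ hjc]
  have hL : pvCell (pvFillUpLeft mat filas columnas).2 i j = ((pvLeftN mat i j : Nat) : Int) := by
    rw [pvFillUpLeft_spec]
    unfold pvCell
    rw [pv_getD_map_range _ _ _ _ hif, pv_getD_map_range _ _ _ _ hjc]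
  have hD : pvCell (pvFillDownRight mat filas columnas).1 i j = ((pvDownN mat filas i j : Nat) : Int) := by
    rw [pvFillDownRight_spec]
    exact pvCellDown mat filas columnas (filas - i) i j le_rfl hif hjc
  have hR : pvCell (pvFillDownRight mat filas columnas).2 i j = ((pvRightN mat columnas i j : Nat) : Int) := by
    rw [pvFillDownRight_spec]
    exact pvCellRight mat filas columnas i j hif hjc
  rw [hU, hL, hD, hR]
  by_cases hc : pvCell mat i j = 1
  · rw [if_pos hc]
    have hu : pvUpWhile mat i j 1 = pvUpN mat i j := by
      rw [pvUpWhile_spec mat i j (i + 1) 1 (by omega)]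
      cases i with
      | zero => simp [pvUpN, hc]
      | succ m => simp [pvUpN, hc, Nat.add_comm]
    have hl : pvLeftWhile mat i j 1 = pvLeftN mat i j := by
      rw [pvLeftWhile_spec mat i j (j + 1) 1 (by omega)]
      cases j with
      | zero => simp [pvLeftN, hc]
      | succ m => simp [pvLeftN, hc, Nat.add_comm]
    have hd : pvDownWhile mat filas i j 1 = pvDownN mat filas i j := by
      rw [pvDownWhile_spec mat filas i j filas 1 (by omega)]
      conv_rhs => rw [pvDownN]
      rw [if_pos hc]
      by_cases h2 : i + 1 < filas
      · have h2' : i < filas - 1 := by omega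
        rw [if_pos h2, if_pos h2']
        omega
      · have h2' : ¬ i < filas - 1 := by omega
        rw [if_neg h2, if_neg h2']
    have hr : pvRightWhile mat columnas i j 1 = pvRightN mat columnas i j := by
      rw [pvRightWhile_spec mat columnas i j columnas 1 (by omega)]
      conv_rhs => rw [pvRightN]
      rw [if_pos hc]
      by_cases h2 : j + 1 < columnas
      · have h2' : j < columnas - 1 := by omega
        rw [if_pos h2, if_pos h2']
        omega
      · have h2' : ¬ j < columnas - 1 := by omega
        rw [if_neg h2, if_neg h2']
    rw [hu, hl, hd, hr]
    constructor
    · push_cast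
      rfl
    · have : (0 : Int) ≤ ((min (min (min (pvUpN mat i j) (pvDownN mat filas i j)) (pvLeftN mat i j)) (pvRightN mat columnas i j) : Nat) : Int) := by positivity
      exact le_trans h02 (le_max_left _ _)
  · rw [if_neg hc]
    rw [pvUpN_zero mat i j hc, pvDownN_zero mat filas i j hc, pvLeftN_zero mat i j hc,
      pvRightN_zero mat columnas i j hc]
    constructor
    · simp [max_eq_left h02]
    · exact h02

-- ===== VERDICT (by name: the statement is the Claim_ definition above) =====
theorem cruz_mas_grande_spec : Claim_equal_cruz_mas_grande := by
  intro matriz _ _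
  unfold Spec_cruz_mas_grande
  unfold cruz_mas_grande cruz_mas_grande_alt
  simp only []
  rw [pvBrazo_eq matriz matriz.length (matriz.headD []).length]
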